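-- pv_equiv track=rewrite | github.com/saicgr/AIFitnessCoach | backend/api/v1/masteries.py | _level_for_value
-- ===== SOURCE A (Python) =====
-- def _level_for_value(thresholds: list, current_value: int) -> int:
--     """How many thresholds has the user crossed?"""
--     level = 0
--     for t in thresholds:
--         if current_value >= t:
--             level += 1
--         else:
--             break
--     # Open-ended past the last seed — award an extra level for each
--     # doubling of the last threshold.
--     if thresholds and current_value >= thresholds[-1]:
--         last = int(thresholds[-1])
--         step = last * 2
--         while current_value >= step:
--             level += 1
--             step *= 2
--     return level
-- ===== SOURCE B (Python) =====
-- def _level_for_value(thresholds: list, current_value: int) -> int: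
--     """How many thresholds has the user crossed?"""
--     n = len(thresholds)
--     level = next((i for i, t in enumerate(thresholds) if current_value < t), n)
--     if thresholds and current_value >= thresholds[-1]:
--         # closed form for the doubling loop: floor(log2(current_value // last))
--         level += (current_value // int(thresholds[-1])).bit_length() - 1
--     return level
-- ===== Notes on version B (the rewrite author's own statement) =====
-- stated objective: simpler
-- what changed: The iterative doubling while-loop past the last threshold is replaced by the closed form (current_value // last).bit_length() - 1, and the break-terminated counting loop becomes a first-failure index via next/enumerate.
-- outside the precondition, e.g. on _level_for_value([0], 5): A does not finish within the time limit, B raises ZeroDivisionError; on _level_for_value([-2], -1): A does not finish within the time limit, B returns 0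
import Mathlib
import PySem

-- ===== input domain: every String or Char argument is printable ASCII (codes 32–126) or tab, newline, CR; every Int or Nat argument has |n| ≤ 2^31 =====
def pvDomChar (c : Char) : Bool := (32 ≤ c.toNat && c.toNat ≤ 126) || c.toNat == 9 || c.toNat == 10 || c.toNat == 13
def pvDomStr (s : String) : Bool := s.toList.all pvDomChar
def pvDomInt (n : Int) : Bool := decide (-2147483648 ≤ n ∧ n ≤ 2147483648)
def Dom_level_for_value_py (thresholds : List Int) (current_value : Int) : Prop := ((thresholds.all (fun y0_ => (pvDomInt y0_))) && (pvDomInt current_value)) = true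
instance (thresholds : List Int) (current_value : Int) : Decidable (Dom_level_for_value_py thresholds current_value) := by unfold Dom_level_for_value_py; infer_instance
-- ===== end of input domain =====

-- B replaces A's doubling while-loop with closed-form bit arithmetic (bit_length); objective: simpler.

-- ===== PORT A =====
-- the for-loop with break: count the crossed prefix
def levelLoopA (cv : Int) : List Int → Int
  | [] => 0
  | t :: ts => if cv ≥ t then 1 + levelLoopA cv ts else 0

-- the while-loop 'while cv >= step: level += 1; step *= 2'; the '0 < step' guard only
-- makes the recursion total (inside Pre_ it is always true, so the condition is Python's)
def whileA (cv step : Int) : Int :=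
  if h : 0 < step ∧ step ≤ cv then 1 + whileA cv (2 * step) else 0
termination_by (cv + 1 - step).toNat
decreasing_by omega

def level_for_value_py (thresholds : List Int) (current_value : Int) : Int :=
  let level := levelLoopA current_value thresholds
  match thresholds.getLast? with
  | none => level
  | some last => if current_value ≥ last then level + whileA current_value (last * 2) else level

-- ===== PORT B =====
-- next((i for i, t in enumerate(thresholds) if current_value < t), n)
def failIdxB (cv : Int) : List Int → Int
  | [] => 0
  | t :: ts => if cv < t then 0 else 1 + failIdxB cv ts

def level_for_value_py_alt (thresholds : List Int) (current_value : Int) : Int :=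
  let level := failIdxB current_value thresholds
  match thresholds.getLast? with
  | none => level
  | some last =>
      if current_value ≥ last then
        level + ((PySem.Int.bitLength (PySem.Int.floordiv current_value last) : Int) - 1)
      else level

-- ===== PRECONDITION & SPEC =====
-- Pre_ excludes exactly the inputs on which A never returns: when the last threshold is ≤ 0
-- and current_value reaches it, A's doubling while-loop runs forever (step stays ≤ current_value).
def Pre_level_for_value_py (thresholds : List Int) (current_value : Int) : Prop :=
  thresholds ≠ [] → current_value ≥ thresholds.getLastD 0 → 0 < thresholds.getLastD 0
instance (thresholds : List Int) (current_value : Int) : Decidable (Pre_level_for_value_py thresholds current_value) := by unfold Pre_level_for_value_py; infer_instance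

def pvWitness_level_for_value_py : List Int × Int := ([1, 2, 4], 5)

def Spec_level_for_value_py (thresholds : List Int) (current_value : Int) (out : Int) : Prop := out = level_for_value_py_alt thresholds current_value
instance (thresholds : List Int) (current_value : Int) (out : Int) : Decidable (Spec_level_for_value_py thresholds current_value out) := by unfold Spec_level_for_value_py; infer_instance

-- ===== CLAIM (what is proved, stated in full; the proofs are below) =====
def Claim_equal_level_for_value_py : Prop := ∀ (thresholds : List Int) (current_value : Int), Dom_level_for_value_py thresholds current_value → Pre_level_for_value_py thresholds current_value → Spec_level_for_value_py thresholds current_value (level_for_value_py thresholds current_value)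

-- ===== LEMMAS AND PROOFS =====

theorem log2_step (n : Nat) (h : 2 ≤ n) : Nat.log2 n = Nat.log2 (n / 2) + 1 := by
  have h1 : Nat.log 2 (n / 2) = Nat.log 2 n - 1 := Nat.log_div_base 2 n
  have h2 : 0 < Nat.log 2 n := Nat.log_pos (by norm_num) h
  rw [Nat.log2_eq_log_two, Nat.log2_eq_log_two, h1]
  omega

theorem loop_eq (cv : Int) (ts : List Int) : levelLoopA cv ts = failIdxB cv ts := by
  induction ts with
  | nil => rfl
  | cons t ts ih =>
    simp only [levelLoopA, failIdxB]
    split_ifs with h1 h2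
    · omega
    · rw [ih]
    · rfl
    · omega

theorem bitLengthAux_eq (f : Nat) : ∀ n : Nat, n < f →
    PySem.Int.bitLengthAux f n = if n = 0 then 0 else Nat.log2 n + 1 := by
  induction f with
  | zero => intro n h; omega
  | succ f ih =>
    intro n h
    unfold PySem.Int.bitLengthAux
    by_cases hn : n = 0
    · simp [hn]
    · simp only [hn, if_false]
      rw [ih (n / 2) (by omega)]
      by_cases h2 : n / 2 = 0
      · have h1 : n = 1 := by omega
        subst h1
        decide
      · simp only [h2, if_false]
        rw [log2_step n (by omega)]

theorem bitLength_pos_cast (m : Nat) (hm : 0 < m) :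
    PySem.Int.bitLength (m : Int) = Nat.log2 m + 1 := by
  unfold PySem.Int.bitLength
  rw [Int.natAbs_natCast, bitLengthAux_eq (m + 1) m (by omega)]
  simp [Nat.pos_iff_ne_zero.mp hm]

theorem whileA_eq_log2 : ∀ (d c s : Nat), c - s ≤ d → 0 < s → s ≤ c →
    whileA (c : Int) (2 * (s : Int)) = (Nat.log2 (c / s) : Int) := by
  intro d
  induction d with
  | zero =>
    intro c s hd hs hsc
    have hcs : c = s := by omega
    rw [whileA]
    have : ¬ (0 < 2 * (s : Int) ∧ 2 * (s : Int) ≤ (c : Int)) := by omega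
    simp only [this, dif_neg, not_false_iff]
    subst hcs
    rw [Nat.div_self hs]
    have h1 : Nat.log2 1 = 0 := by decide
    simp [h1]
  | succ d ih =>
    intro c s hd hs hsc
    rw [whileA]
    by_cases h2 : 2 * s ≤ c
    · have hcond : 0 < 2 * (s : Int) ∧ 2 * (s : Int) ≤ (c : Int) := by omega
      rw [dif_pos hcond]
      have hcast : (2 : Int) * (2 * (s : Int)) = 2 * ((2 * s : Nat) : Int) := by push_cast; ring
      rw [hcast, ih c (2 * s) (by omega) (by omega) h2]
      have hdd : c / (2 * s) = (c / s) / 2 := by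
        rw [Nat.div_div_eq_div_mul, Nat.mul_comm]
      rw [hdd]
      have h2q : 2 ≤ c / s := (Nat.le_div_iff_mul_le hs).mpr (by omega)
      rw [log2_step (c / s) h2q]
      push_cast
      ring
    · have : ¬ (0 < 2 * (s : Int) ∧ 2 * (s : Int) ≤ (c : Int)) := by omega
      rw [dif_neg this]
      have hq : c / s = 1 := by
        apply Nat.div_eq_of_lt_le <;> omega
      have h1 : Nat.log2 1 = 0 := by decide
      simp [hq, h1]

-- ===== VERDICT (by name: the statement is the Claim_ definition above) =====
theorem level_for_value_py_spec : Claim_equal_level_for_value_py := by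
  intro ts cv _ pre
  unfold Spec_level_for_value_py level_for_value_py level_for_value_py_alt
  simp only [loop_eq]
  cases hl : ts.getLast? with
  | none => rfl
  | some last =>
    simp only
    by_cases hge : cv ≥ last
    · simp only [hge, if_pos]
      have hne : ts ≠ [] := by
        intro h; subst h; simp at hl
      have hD : ts.getLastD 0 = last := by
        rw [List.getLastD_eq_getLast?, hl]; rfl
      have hlast : 0 < last := by
        have := pre hne; rw [hD] at this; exact this hge
      -- move to Nat
      obtain ⟨l, hl'⟩ : ∃ l : Nat, last = (l : Int) := ⟨last.toNat, by omega⟩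
      obtain ⟨c, hc'⟩ : ∃ c : Nat, cv = (c : Int) := ⟨cv.toNat, by omega⟩
      subst hl' hc'
      have hls : 0 < l := by exact_mod_cast hlast
      have hlc : l ≤ c := by exact_mod_cast hge
      have h1 : (l : Int) * 2 = 2 * (l : Int) := by ring
      rw [h1, whileA_eq_log2 (c - l) c l (le_refl _) hls hlc]
      have h2 : PySem.Int.floordiv (c : Int) (l : Int) = ((c / l : Nat) : Int) :=
        PySem.Int.floordiv_natCast c l
      rw [h2, bitLength_pos_cast (c / l) (Nat.one_le_div_iff hls |>.mpr hlc)]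
      push_cast
      ring
    · simp [hge]
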